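-- pv_equiv track=rewrite | github.com/RBVI/ChimeraX | src/bundles/surface/src/texture.py | _vertex_color_numbers
-- ===== SOURCE A (Python) =====
-- def _vertex_color_numbers(vertex_colors):
--     color_list = []	# List of colors for palette texture.
--     color_num = {}	# Map color to color number
--     color_nums = []
--     for c in vertex_colors:
--         tc = tuple(c)
--         if tc not in color_num:
--             color_num[tc] = len(color_num)
--             color_list.append(tc)
--         color_nums.append(color_num[tc])
--
--     return color_list, color_nums
-- ===== SOURCE B (Python) =====
-- def _vertex_color_numbers(vertex_colors):
--     # Stamping scan: no dict and no running index table.  Walk the positions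
--     # left to right; whenever a position is still unnumbered its color is new,
--     # so append it to the palette and stamp its number onto every later
--     # occurrence in one inner sweep.
--     tups = [tuple(c) for c in vertex_colors]
--     n = len(tups)
--     color_nums = [-1] * n          # -1 = not yet numbered
--     color_list = []
--     for i in range(n):
--         if color_nums[i] < 0:
--             c = tups[i]
--             k = len(color_list)
--             color_list.append(c)
--             for j in range(i, n):
--                 if tups[j] == c:
--                     color_nums[j] = k
--     return color_list, color_nums
-- ===== Notes on version B (the rewrite author's own statement) =====
-- stated objective: alternative
-- what changed: A's dict-based single pass (hash table mapping color -> number, consulted per element) is replaced by a dict-free stamping scan: walk the positions, and whenever a position is still unnumbered append its color to the palette and stamp that number onto every later occurrence in an inner sweep.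
import Mathlib
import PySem

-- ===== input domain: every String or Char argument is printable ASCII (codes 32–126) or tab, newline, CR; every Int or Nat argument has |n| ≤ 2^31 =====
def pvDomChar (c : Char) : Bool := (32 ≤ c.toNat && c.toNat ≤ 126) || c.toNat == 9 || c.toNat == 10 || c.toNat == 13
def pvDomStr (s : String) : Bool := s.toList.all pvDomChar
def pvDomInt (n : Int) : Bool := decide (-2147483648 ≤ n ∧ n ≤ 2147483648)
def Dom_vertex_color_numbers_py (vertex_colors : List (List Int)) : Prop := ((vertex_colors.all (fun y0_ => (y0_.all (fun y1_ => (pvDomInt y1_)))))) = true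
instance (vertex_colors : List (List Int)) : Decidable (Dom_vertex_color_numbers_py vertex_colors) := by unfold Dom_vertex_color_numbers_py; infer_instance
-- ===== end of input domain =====

-- B replaces A's dict-based single pass by a dict-free stamping scan: walk the
-- positions; an unnumbered position carries a new color, which is appended to the
-- palette and its number stamped onto every later occurrence by an inner sweep
-- (alternative algorithm, no hash table).

-- ===== PORT A =====
-- one step of A's loop body, on the state (color_list, color_num, color_nums)
def vcnStep (st : List (List Int) × PySem.Dict (List Int) Int × List Int) (c : List Int) :
    List (List Int) × PySem.Dict (List Int) Int × List Int :=
  let cl := st.1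
  let cn := st.2.1
  let cns := st.2.2
  if cn.contains c then
    (cl, cn, cns ++ [cn.getD c 0])          -- color_num[tc]: key present, getD exact here
  else
    let cn' := cn.insert c (cn.size : Int)  -- color_num[tc] = len(color_num)
    (cl ++ [c], cn', cns ++ [cn'.getD c 0])

def vertex_color_numbers_py (vertex_colors : List (List Int)) : List (List Int) × List Int :=
  let st := vertex_colors.foldl vcnStep ([], PySem.Dict.empty, [])
  (st.1, st.2.2)

-- ===== PORT B =====
-- body of B's outer 'for i in range(n)' loop, on the state (color_nums, color_list)
def vcnStamp (tups : List (List Int)) (n : Int) (st : List Int × List (List Int)) (i : Int) :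
    List Int × List (List Int) :=
  let nums := st.1
  let cl := st.2
  if PySem.List.pyGetD nums i 0 < 0 then    -- color_nums[i] < 0 : index always in range here
    let c := PySem.List.pyGetD tups i []    -- c = tups[i]
    let k := (cl.length : Int)              -- k = len(color_list)
    -- for j in range(i, n): if tups[j] == c: color_nums[j] = k
    let nums' := (PySem.List.pyRange i n 1).foldl
        (fun acc j => if PySem.List.pyGetD tups j [] == c then PySem.List.pySetD acc j k else acc)
        nums
    (nums', cl ++ [c])
  else st

def vertex_color_numbers_py_alt (vertex_colors : List (List Int)) : List (List Int) × List Int :=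
  let tups := vertex_colors                 -- tuple(c) is the identity under this typing
  let n := (tups.length : Int)
  let st := (PySem.List.pyRange 0 n 1).foldl (vcnStamp tups n)
      (List.replicate tups.length (-1), []) -- ([-1]*n, [])
  (st.2, st.1)

-- ===== PRECONDITION & SPEC =====
def Spec_vertex_color_numbers_py (vertex_colors : List (List Int)) (out : List (List Int) × List Int) : Prop := out = vertex_color_numbers_py_alt vertex_colors
instance (vertex_colors : List (List Int)) (out : List (List Int) × List Int) : Decidable (Spec_vertex_color_numbers_py vertex_colors out) := by unfold Spec_vertex_color_numbers_py; infer_instance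

-- ===== CLAIM (what is proved, stated in full; the proofs are below) =====
def Claim_equal_vertex_color_numbers_py : Prop := ∀ (vertex_colors : List (List Int)), Dom_vertex_color_numbers_py vertex_colors → Spec_vertex_color_numbers_py vertex_colors (vertex_color_numbers_py vertex_colors)

-- ===== LEMMAS AND PROOFS =====

-- Both sides are proved equal to the common normal form
--   (dedup l, l.map (fun c => ((dedup l).idxOf c : Int))).

-- ---- A-side ----

-- the index dict A builds over a duplicate-free key list, reconstructed abstractly
def vcnIndex (color_list : List (List Int)) : PySem.Dict (List Int) Int :=
  (PySem.List.enumerate color_list 0).foldl (fun d p => d.insert p.2 p.1) PySem.Dict.empty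

theorem enumerate_append_singleton {α : Type} (xs : List α) (x : α) (s : Int) :
    PySem.List.enumerate (xs ++ [x]) s = PySem.List.enumerate xs s ++ [(s + xs.length, x)] := by
  induction xs generalizing s with
  | nil => simp [PySem.List.enumerate_nil, PySem.List.enumerate_cons]
  | cons a t ih =>
      simp [PySem.List.enumerate_cons, ih (s + 1)]
      ring_nf

theorem vcnIndex_append (ks : List (List Int)) (x : List Int) :
    vcnIndex (ks ++ [x]) = (vcnIndex ks).insert x (ks.length : Int) := by
  unfold vcnIndex
  rw [enumerate_append_singleton, List.foldl_append]
  simp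

theorem vcnIndex_keys (ks : List (List Int)) (h : ks.Nodup) : (vcnIndex ks).keys = ks := by
  have hk := PySem.Dict.keys_foldl_insert_key (l := PySem.List.enumerate ks 0)
    (key := fun p : Int × List Int => p.2) (f := fun _ p => p.1) (d := PySem.Dict.empty)
  unfold vcnIndex
  rw [hk]
  simp only [PySem.Dict.keys_empty, PySem.List.map_snd_enumerate, PySem.Set.update_nil_left]
  exact PySem.Set.ofList_eq_self_of_nodup ks h

theorem vcnIndex_contains (ks : List (List Int)) (h : ks.Nodup) (c : List Int) :
    (vcnIndex ks).contains c = decide (c ∈ ks) := by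
  rw [PySem.Dict.contains_eq_decide_mem_keys, vcnIndex_keys ks h]

theorem vcnIndex_size (ks : List (List Int)) (h : ks.Nodup) : (vcnIndex ks).size = ks.length := by
  have hi := PySem.Dict.items_foldl_insert_fresh (l := PySem.List.enumerate ks 0)
    (k := fun p : Int × List Int => p.2) (v := fun p => p.1) (d := PySem.Dict.empty)
    (by intro a _; simp [PySem.Dict.contains_empty])
    (by simpa [PySem.List.map_snd_enumerate] using h)
  unfold vcnIndex
  rw [PySem.Dict.size, hi]
  simp [PySem.List.length_enumerate, PySem.Dict.empty]

-- the value stored for a key is its position in the key list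
theorem vcnIndex_getD_idxOf (ks : List (List Int)) (h : ks.Nodup) (c : List Int) (hc : c ∈ ks) :
    (vcnIndex ks).getD c 0 = (ks.idxOf c : Int) := by
  induction ks using List.reverseRecOn generalizing c with
  | nil => cases hc
  | append_singleton t x ih =>
      have hnd : t.Nodup := (List.nodup_append.mp h).1
      have hx : x ∉ t := by
        simp [List.nodup_append] at h
        exact fun hxm => (h.2 x hxm) rfl
      rw [vcnIndex_append]
      by_cases hcx : c = x
      · subst hcx
        rw [PySem.Dict.getD_insert_self, List.idxOf_append]
        simp [hx]
      · rw [PySem.Dict.getD_insert, if_neg hcx]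
        have hct : c ∈ t := by
          rcases List.mem_append.mp hc with h1 | h1
          · exact h1
          · exact absurd (List.mem_singleton.mp h1) hcx
        rw [ih hnd c hct, List.idxOf_append_of_mem hct]

-- the loop invariant: A's fold over l ends in exactly these three quantities
theorem vcn_fold (l : List (List Int)) :
    l.foldl vcnStep ([], PySem.Dict.empty, []) =
      (PySem.List.dedup l, vcnIndex (PySem.List.dedup l),
       l.map (fun c => (vcnIndex (PySem.List.dedup l)).getD c 0)) := by
  induction l using List.reverseRecOn with
  | nil => simp [vcnIndex, PySem.List.dedup, PySem.List.enumerate_nil]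
  | append_singleton t x ih =>
      have hnd : (PySem.List.dedup t).Nodup := PySem.List.nodup_dedup t
      rw [List.foldl_append, ih]
      simp only [List.foldl_cons, List.foldl_nil]
      by_cases hx : x ∈ t
      · have hded : PySem.List.dedup (t ++ [x]) = PySem.List.dedup t := by
          rw [PySem.List.dedup_eq_ofList, PySem.List.dedup_eq_ofList,
              PySem.Set.ofList_append_singleton,
              PySem.Set.add_of_mem (by simp [PySem.Set.mem_ofList, hx])]
        have hcont : (vcnIndex (PySem.List.dedup t)).contains x = true := by
          rw [vcnIndex_contains _ hnd]
          simp [hx]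
        rw [hded]
        simp only [vcnStep, hcont, if_true, List.map_append, List.map_cons, List.map_nil]
      · have hded : PySem.List.dedup (t ++ [x]) = PySem.List.dedup t ++ [x] := by
          rw [PySem.List.dedup_eq_ofList, PySem.List.dedup_eq_ofList,
              PySem.Set.ofList_append_singleton,
              PySem.Set.add_of_not_mem (by simp [PySem.Set.mem_ofList, hx])]
        have hcont : (vcnIndex (PySem.List.dedup t)).contains x = false := by
          rw [vcnIndex_contains _ hnd]
          simp [hx]
        have hmap : t.map (fun c =>
              ((vcnIndex (PySem.List.dedup t)).insert x ((PySem.List.dedup t).length : Int)).getD c 0)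
            = t.map (fun c => (vcnIndex (PySem.List.dedup t)).getD c 0) := by
          apply List.map_congr_left
          intro c hc
          rw [PySem.Dict.getD_insert]
          exact if_neg (fun h => hx (by rwa [h] at hc))
        rw [hded, vcnIndex_append]
        simp only [vcnStep, hcont, Bool.false_eq_true, if_false,
          vcnIndex_size _ hnd, List.map_append, List.map_cons, List.map_nil, hmap,
          PySem.Dict.getD_insert_self]

-- A's result in normal form
theorem a_norm (l : List (List Int)) :
    vertex_color_numbers_py l =
      (PySem.List.dedup l, l.map (fun c => ((PySem.List.dedup l).idxOf c : Int))) := by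
  unfold vertex_color_numbers_py
  rw [vcn_fold]
  refine Prod.ext rfl ?_
  refine List.map_congr_left (fun c hc => ?_)
  exact vcnIndex_getD_idxOf _ (PySem.List.nodup_dedup l) c
    (by rw [PySem.List.mem_dedup]; exact hc)

-- ---- B-side ----

-- dedup of a prefix is a prefix of dedup
theorem dedup_append_prefix (ys zs : List (List Int)) :
    PySem.List.dedup ys <+: PySem.List.dedup (ys ++ zs) := by
  induction zs using List.reverseRecOn with
  | nil => simp
  | append_singleton t x ih =>
      rw [← List.append_assoc]
      refine ih.trans ?_
      rw [PySem.List.dedup_eq_ofList, PySem.List.dedup_eq_ofList,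
          PySem.Set.ofList_append_singleton]
      by_cases hx : x ∈ PySem.Set.ofList (ys ++ t)
      · rw [PySem.Set.add_of_mem hx]
      · rw [PySem.Set.add_of_not_mem hx]
        exact List.prefix_append _ _

-- the inner stamping sweep, on a state split at position a
theorem stamp_fold (tups : List (List Int)) (c : List Int) (k : Int) (g : List Int → Int)
    (a : Nat) (ha : a ≤ tups.length) :
    (PySem.List.pyRange (a : Int) (tups.length : Int) 1).foldl
      (fun acc j => if PySem.List.pyGetD tups j [] == c then PySem.List.pySetD acc j k else acc)
      ((tups.take a).map (fun x => if x = c then k else g x) ++ (tups.drop a).map g)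
    = tups.map (fun x => if x = c then k else g x) := by
  induction hn : tups.length - a generalizing a g with
  | zero =>
      have haeq : a = tups.length := le_antisymm ha (by omega)
      subst haeq
      rw [PySem.List.pyRange_one_eq_nil (le_refl _)]
      simp [List.take_of_length_le (le_refl tups.length)]
  | succ m ih =>
      have hlt : a < tups.length := by omega
      have hltI : (a : Int) < (tups.length : Int) := by exact_mod_cast hlt
      rw [PySem.List.pyRange_one_cons hltI]
      rw [List.foldl_cons]
      have hgetA : PySem.List.pyGetD tups (a : Int) [] = tups[a] := by
        rw [PySem.List.pyGetD_natCast, List.getD_eq_getElem _ _ hlt]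
      have hdropA : tups.drop a = tups[a] :: tups.drop (a + 1) :=
        List.drop_eq_getElem_cons hlt
      have htakeA : tups.take (a + 1) = tups.take a ++ [tups[a]] :=
        List.take_succ_eq_append_getElem hlt
      have hlenTake : ((tups.take a).map (fun x => if x = c then k else g x)).length = a := by
        simp [List.length_take, Nat.min_eq_left (le_of_lt hlt)]
      have hcast : (a : Int) + 1 = ((a + 1 : Nat) : Int) := by push_cast; ring
      by_cases hx : tups[a] = c
      · have hbeq : (PySem.List.pyGetD tups (a : Int) [] == c) = true := by
          rw [hgetA]; exact beq_iff_eq.mpr hx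
        rw [hbeq]
        simp only [if_true]
        have hset : PySem.List.pySetD
            ((tups.take a).map (fun x => if x = c then k else g x) ++ (tups.drop a).map g)
            (a : Int) k
            = (tups.take (a + 1)).map (fun x => if x = c then k else g x)
              ++ (tups.drop (a + 1)).map g := by
          rw [PySem.List.pySetD_natCast, hdropA, List.map_cons, htakeA, List.map_append]
          rw [List.set_append]
          rw [hlenTake]
          simp [hx]
        rw [hset, hcast]
        exact ih g (a + 1) (by omega) (by omega)
      · have hbeq : (PySem.List.pyGetD tups (a : Int) [] == c) = false := by
          rw [hgetA]; exact beq_eq_false_iff_ne.mpr hx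
        rw [hbeq]
        simp only [Bool.false_eq_true, if_false]
        have hst : (tups.take a).map (fun x => if x = c then k else g x) ++ (tups.drop a).map g
            = (tups.take (a + 1)).map (fun x => if x = c then k else g x)
              ++ (tups.drop (a + 1)).map g := by
          rw [hdropA, List.map_cons, htakeA, List.map_append]
          simp [hx, List.append_assoc]
        rw [hst, hcast]
        exact ih g (a + 1) (by omega) (by omega)

-- the outer loop invariant
theorem outer_fold (l : List (List Int)) (a : Nat) (ha : a ≤ l.length) :
    (PySem.List.pyRange (a : Int) (l.length : Int) 1).foldl (vcnStamp l (l.length : Int))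
      (l.map (fun x => if x ∈ l.take a then ((PySem.List.dedup l).idxOf x : Int) else -1),
       PySem.List.dedup (l.take a))
    = (l.map (fun x => ((PySem.List.dedup l).idxOf x : Int)), PySem.List.dedup l) := by
  induction hn : l.length - a generalizing a with
  | zero =>
      have haeq : a = l.length := le_antisymm ha (by omega)
      subst haeq
      rw [PySem.List.pyRange_one_eq_nil (le_refl _)]
      rw [List.take_of_length_le (le_refl l.length)]
      simp only [List.foldl_nil]
      refine congrArg₂ Prod.mk ?_ rfl
      exact List.map_congr_left (fun x hx => by simp [hx])
  | succ m ih =>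
      have hlt : a < l.length := by omega
      have hltI : (a : Int) < (l.length : Int) := by exact_mod_cast hlt
      have htakeA : l.take (a + 1) = l.take a ++ [l[a]] :=
        List.take_succ_eq_append_getElem hlt
      have hcast : (a : Int) + 1 = ((a + 1 : Nat) : Int) := by push_cast; ring
      rw [PySem.List.pyRange_one_cons hltI, List.foldl_cons]
      have hgetNums : PySem.List.pyGetD
          (l.map (fun x => if x ∈ l.take a then ((PySem.List.dedup l).idxOf x : Int) else -1))
          (a : Int) 0
          = (if l[a] ∈ l.take a then ((PySem.List.dedup l).idxOf l[a] : Int) else -1) := by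
        rw [PySem.List.pyGetD_natCast,
            List.getD_eq_getElem _ _ (by simpa using hlt), List.getElem_map]
      by_cases hm : l[a] ∈ l.take a
      · -- position a already numbered: the branch is skipped and nothing changes
        have hcond : ¬ (PySem.List.pyGetD
            (l.map (fun x => if x ∈ l.take a then ((PySem.List.dedup l).idxOf x : Int) else -1))
            (a : Int) 0 < 0) := by
          rw [hgetNums, if_pos hm]
          exact not_lt.mpr (Int.natCast_nonneg _)
        rw [vcnStamp, if_neg hcond]
        have hmemEq : ∀ x ∈ l, (x ∈ l.take (a + 1)) ↔ (x ∈ l.take a) := by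
          intro x _
          rw [htakeA]
          simp only [List.mem_append, List.mem_singleton]
          exact ⟨fun h => h.elim id (fun he => by rw [he]; exact hm), Or.inl⟩
        have hmapEq : l.map (fun x => if x ∈ l.take (a + 1) then ((PySem.List.dedup l).idxOf x : Int) else -1)
            = l.map (fun x => if x ∈ l.take a then ((PySem.List.dedup l).idxOf x : Int) else -1) := by
          refine List.map_congr_left (fun x hx => by simp only [hmemEq x hx])
        have hdedEq : PySem.List.dedup (l.take (a + 1)) = PySem.List.dedup (l.take a) := by
          rw [htakeA, PySem.List.dedup_eq_ofList, PySem.List.dedup_eq_ofList,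
              PySem.Set.ofList_append_singleton,
              PySem.Set.add_of_mem (by rw [PySem.Set.mem_ofList]; exact hm)]
        have := ih (a + 1) (by omega) (by omega)
        rw [hmapEq, hdedEq] at this
        rw [hcast]
        exact this
      · -- a new color: stamp its number onto all its occurrences
        have hcond : PySem.List.pyGetD
            (l.map (fun x => if x ∈ l.take a then ((PySem.List.dedup l).idxOf x : Int) else -1))
            (a : Int) 0 < 0 := by
          rw [hgetNums, if_neg hm]
          decide
        rw [vcnStamp]
        simp only [hcond, if_true]
        have hgetA : PySem.List.pyGetD l (a : Int) [] = l[a] := by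
          rw [PySem.List.pyGetD_natCast, List.getD_eq_getElem _ _ hlt]
        have hmemDed : l[a] ∉ PySem.List.dedup (l.take a) := by
          rw [PySem.List.dedup_eq_ofList, PySem.Set.mem_ofList]
          exact hm
        have hdedSucc : PySem.List.dedup (l.take (a + 1))
            = PySem.List.dedup (l.take a) ++ [l[a]] := by
          rw [htakeA, PySem.List.dedup_eq_ofList, PySem.List.dedup_eq_ofList,
              PySem.Set.ofList_append_singleton,
              PySem.Set.add_of_not_mem (by rw [PySem.Set.mem_ofList]; exact hm)]
        -- the fresh number k = len(color_list) is l[a]'s index in dedup l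
        have hk : ((PySem.List.dedup l).idxOf l[a] : Int)
            = ((PySem.List.dedup (l.take a)).length : Int) := by
          obtain ⟨rest, hrest⟩ := dedup_append_prefix (l.take (a + 1)) (l.drop (a + 1))
          rw [List.take_append_drop] at hrest
          rw [← hrest, hdedSucc, List.append_assoc, List.idxOf_append, if_neg hmemDed]
          simp
        -- the stamping sweep, via stamp_fold with the state split at a
        have hg': ∀ x ∈ l.take a,
            (if x = l[a] then ((PySem.List.dedup (l.take a)).length : Int)
             else if x ∈ l.take a then ((PySem.List.dedup l).idxOf x : Int) else -1)
            = (if x ∈ l.take a then ((PySem.List.dedup l).idxOf x : Int) else -1) := by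
          intro x hxt
          have hne : x ≠ l[a] := fun he => hm (by rw [← he]; exact hxt)
          rw [if_neg hne]
        have hsplit : l.map (fun x => if x ∈ l.take a then ((PySem.List.dedup l).idxOf x : Int) else -1)
            = (l.take a).map (fun x => if x = l[a] then ((PySem.List.dedup (l.take a)).length : Int)
                else if x ∈ l.take a then ((PySem.List.dedup l).idxOf x : Int) else -1)
              ++ (l.drop a).map (fun x => if x ∈ l.take a then ((PySem.List.dedup l).idxOf x : Int) else -1) := by
          conv_lhs => rw [← List.take_append_drop a
            (l.map (fun x => if x ∈ l.take a then ((PySem.List.dedup l).idxOf x : Int) else -1))]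
          rw [← List.map_take, ← List.map_drop, (List.map_congr_left hg').symm]
        rw [hgetA, hsplit, stamp_fold l l[a] _ _ a (le_of_lt hlt)]
        -- the stamped array is exactly the invariant map for a+1
        have hmapEq : l.map (fun x => if x = l[a] then ((PySem.List.dedup (l.take a)).length : Int)
              else if x ∈ l.take a then ((PySem.List.dedup l).idxOf x : Int) else -1)
            = l.map (fun x => if x ∈ l.take (a + 1) then ((PySem.List.dedup l).idxOf x : Int) else -1) := by
          refine List.map_congr_left (fun x hx => ?_)
          by_cases hxe : x = l[a]
          · subst hxe
            rw [if_pos rfl, if_pos (by rw [htakeA]; exact List.mem_append_right _ (List.mem_singleton_self _))]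
            exact hk.symm
          · rw [if_neg hxe]
            have hiff : (x ∈ l.take (a + 1)) ↔ (x ∈ l.take a) := by
              rw [htakeA]
              simp only [List.mem_append, List.mem_singleton]
              exact ⟨fun h => h.elim id (fun he => absurd he hxe), Or.inl⟩
            simp only [hiff]
        rw [hmapEq, ← hdedSucc, hcast]
        exact ih (a + 1) (by omega) (by omega)

-- B's result in normal form
theorem b_norm (l : List (List Int)) :
    vertex_color_numbers_py_alt l =
      (PySem.List.dedup l, l.map (fun c => ((PySem.List.dedup l).idxOf c : Int))) := by
  have h0 := outer_fold l 0 (Nat.zero_le _)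
  simp only [List.take_zero, List.not_mem_nil, if_false] at h0
  have hrep : l.map (fun _ : List Int => (-1 : Int)) = List.replicate l.length (-1) := by
    simp [List.map_const']
  rw [hrep, show PySem.List.dedup ([] : List (List Int)) = [] from rfl,
      show ((0 : Nat) : Int) = (0 : Int) from rfl] at h0
  show (((PySem.List.pyRange 0 (l.length : Int) 1).foldl (vcnStamp l (l.length : Int))
          (List.replicate l.length (-1), [])).2,
        ((PySem.List.pyRange 0 (l.length : Int) 1).foldl (vcnStamp l (l.length : Int))
          (List.replicate l.length (-1), [])).1)
      = (PySem.List.dedup l, l.map (fun c => ((PySem.List.dedup l).idxOf c : Int)))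
  rw [h0]

-- ===== VERDICT (by name: the statement is the Claim_ definition above) =====
theorem vertex_color_numbers_py_spec : Claim_equal_vertex_color_numbers_py := by
  intro vcs _
  unfold Spec_vertex_color_numbers_py
  rw [a_norm, b_norm]
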